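-- pv_equiv track=rewrite | github.com/dmtAndIvanson/dmtAnd_YandexAlgorithmTraining | t10/Ya5/H/H.py | find_substring_with_k_elements
-- ===== SOURCE A (Python) =====
-- def find_substring_with_k_elements(string, n, k):
--         # Substring has k same elments.
--     # Find longest substring in string.
--     left = 0
--     right = 0
--
--     letter_count = {}
--
--     max_len = 0
--     start = 0
--
--     while right < n and left <= right:
--         if string[right] not in letter_count:
--             letter_count[string[right]] = 0
--         letter_count[string[right]] += 1
--         while letter_count[string[right]] > k:
--             letter_count[string[left]] -= 1
--             left += 1
--         if right-left+1 > max_len: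
--             max_len = right-left+1
--             start = left+1
--         right += 1
--
--     return (max_len, start)
-- ===== SOURCE B (Python) =====
-- def find_substring_with_k_elements(string, n, k):
--     # For each right end, recompute the minimal left by scanning backward
--     # from right, stopping just before any character count would exceed k.
--     max_len = 0
--     start = 0
--     for right in range(n):
--         counts = {}
--         left = right + 1
--         j = right
--         while j >= 0:
--             c = string[j]
--             if counts.get(c, 0) + 1 > k:
--                 break
--             counts[c] = counts.get(c, 0) + 1
--             left = j
--             j -= 1
--         length = right - left + 1
--         if length > max_len:
--             max_len = length
--             start = left + 1
--     return (max_len, start)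
-- ===== Notes on version B (the rewrite author's own statement) =====
-- stated objective: alternative
-- what changed: Replaces A's incremental sliding window (shared left pointer and one count dict maintained across iterations) with per-right recomputation: for each right end a fresh backward scan finds the minimal left whose window keeps every character count <= k.
-- outside the precondition, e.g. on find_substring_with_k_elements('bbbaa', 2, -1): A returns (0, 0), B returns (0, 0)
import Mathlib
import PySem

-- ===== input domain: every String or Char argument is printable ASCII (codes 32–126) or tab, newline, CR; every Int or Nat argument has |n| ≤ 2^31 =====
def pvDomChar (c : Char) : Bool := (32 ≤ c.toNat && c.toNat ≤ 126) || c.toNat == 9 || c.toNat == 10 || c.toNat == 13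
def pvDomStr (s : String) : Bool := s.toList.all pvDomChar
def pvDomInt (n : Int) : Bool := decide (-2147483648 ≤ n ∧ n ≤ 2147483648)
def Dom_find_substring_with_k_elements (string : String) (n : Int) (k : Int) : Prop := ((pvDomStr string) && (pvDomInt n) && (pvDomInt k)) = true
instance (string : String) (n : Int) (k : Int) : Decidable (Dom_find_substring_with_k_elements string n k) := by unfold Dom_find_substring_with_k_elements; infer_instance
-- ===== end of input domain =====

-- B replaces A's incremental sliding window with an independent backward scan per right
-- end (alternative decomposition, not faster); equal return values on Pre_.

-- ===== PORT A =====
-- the inner `while letter_count[string[right]] > k` loop of A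
def pvAInner (s : List Char) (k : Int) (c0 : Char) (lc : PySem.Dict Char Int) (left : Int) :
    Option (PySem.Dict Char Int × Int) :=
  if lc.getD c0 0 > k then
    match h : PySem.List.pyGet? s left with
    | none => none
    | some cl => pvAInner s k c0 (lc.insert cl (lc.getD cl 0 - 1)) (left + 1)
  else some (lc, left)
termination_by ((s.length : Int) + 1 - left).toNat
decreasing_by
  have hin : PySem.Raise.InRange s.length left := by
    by_contra hc
    have hn := (PySem.List.pyGet?_eq_none_iff (xs := s) (i := left)).mpr hc
    simp [hn] at h
  simp only [PySem.Raise.InRange] at hin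
  omega

-- the outer `while right < n and left <= right` loop of A (none = an index/key error of A)
def pvAOuter (s : List Char) (n k : Int) (left right maxLen start : Int)
    (lc : PySem.Dict Char Int) : Option (Int × Int) :=
  if right < n ∧ left ≤ right then
    match PySem.List.pyGet? s right with
    | none => none
    | some c =>
      let lc0 := if lc.contains c then lc else lc.insert c 0
      let lc1 := lc0.insert c (lc0.getD c 0 + 1)
      match pvAInner s k c lc1 left with
      | none => none
      | some (lc2, left2) =>
        if right - left2 + 1 > maxLen then
          pvAOuter s n k left2 (right + 1) (right - left2 + 1) (left2 + 1) lc2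
        else
          pvAOuter s n k left2 (right + 1) maxLen start lc2
  else some (maxLen, start)
termination_by (n - right).toNat
decreasing_by all_goals omega

def find_substring_with_k_elements (string : String) (n : Int) (k : Int) : Int × Int :=
  (pvAOuter string.toList n k 0 0 0 0 PySem.Dict.empty).getD (0, 0)

-- ===== PORT B =====
-- B's backward `while j >= 0` scan; invariantly called with left = j + 1
def pvBScan (s : List Char) (k : Int) (counts : PySem.Dict Char Int) (left j : Int) : Option Int :=
  if 0 ≤ j then
    match PySem.List.pyGet? s j with
    | none => none
    | some c =>
      if counts.getD c 0 + 1 > k then some left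
      else pvBScan s k (counts.insert c (counts.getD c 0 + 1)) j (j - 1)
  else some left
termination_by (j + 1).toNat
decreasing_by omega

def find_substring_with_k_elements_alt (string : String) (n : Int) (k : Int) : Int × Int :=
  ((PySem.List.pyRange 0 n 1).foldl
    (fun acc right =>
      match acc with
      | none => none
      | some ms =>
        match pvBScan string.toList k PySem.Dict.empty (right + 1) right with
        | none => none
        | some left =>
          if right - left + 1 > ms.1 then some (right - left + 1, left + 1) else some ms)
    (some ((0 : Int), (0 : Int)))).getD (0, 0)

-- ===== PRECONDITION & SPEC =====
-- Pre_ excludes n > len(string), where A raises IndexError, and k < 0 with 0 < n, where A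
-- raises KeyError/IndexError on most inputs and on the rest only returns (0,0) through
-- leftover negative counts of its window state.
def Pre_find_substring_with_k_elements (string : String) (n : Int) (k : Int) : Prop :=
  (n ≤ (string.toList.length : Int) ∧ 0 ≤ k) ∨ n ≤ 0
instance (string : String) (n : Int) (k : Int) : Decidable (Pre_find_substring_with_k_elements string n k) := by unfold Pre_find_substring_with_k_elements; infer_instance
def pvWitness_find_substring_with_k_elements : String × Int × Int := ("abacabad", 8, 2)
def Spec_find_substring_with_k_elements (string : String) (n : Int) (k : Int) (out : Int × Int) : Prop := out = find_substring_with_k_elements_alt string n k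
instance (string : String) (n : Int) (k : Int) (out : Int × Int) : Decidable (Spec_find_substring_with_k_elements string n k out) := by unfold Spec_find_substring_with_k_elements; infer_instance

-- ===== CLAIM (what is proved, stated in full; the proofs are below) =====
def Claim_equal_find_substring_with_k_elements : Prop := ∀ (string : String) (n : Int) (k : Int), Dom_find_substring_with_k_elements string n k → Pre_find_substring_with_k_elements string n k → Spec_find_substring_with_k_elements string n k (find_substring_with_k_elements string n k)

-- ===== LEMMAS AND PROOFS =====

-- the window string[a:b] and the validity predicate "every count ≤ k" (Bool, for Nat.find)
def pvWin (l : List Char) (a b : Nat) : List Char := (l.drop a).take (b - a)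
def pvOk (l : List Char) (k : Int) (a b : Nat) : Bool :=
  (pvWin l a b).all (fun c => decide (((pvWin l a b).count c : Int) ≤ k))

theorem pvOk_of_ge (l : List Char) (k : Int) {a b : Nat} (h : b ≤ a) : pvOk l k a b = true := by
  simp [pvOk, pvWin, Nat.sub_eq_zero_of_le h]

-- the minimal left end of a valid window with right end r
def pvMinL (l : List Char) (k : Int) (r : Nat) : Nat :=
  Nat.find (⟨r + 1, pvOk_of_ge l k le_rfl⟩ : ∃ a, pvOk l k a (r + 1) = true)

-- the common reference step: both programs update (max_len, start) with left = pvMinL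
def pvRefStep (l : List Char) (k : Int) (ms : Int × Int) (r : Nat) : Int × Int :=
  if (r : Int) - (pvMinL l k r) + 1 > ms.1 then ((r : Int) - (pvMinL l k r) + 1, (pvMinL l k r : Int) + 1) else ms

theorem pvWin_drop (l : List Char) {a a' : Nat} (b : Nat) (h : a ≤ a') :
    pvWin l a' b = (pvWin l a b).drop (a' - a) := by
  have h1 : a + (a' - a) = a' := by omega
  have h2 : b - a - (a' - a) = b - a' := by omega
  rw [pvWin, pvWin, List.drop_take, List.drop_drop, h1, h2]

theorem pvWin_cons {l : List Char} {a b : Nat} (hab : a < b) (hl : a < l.length) :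
    pvWin l a b = l[a] :: pvWin l (a + 1) b := by
  rw [pvWin, pvWin, List.drop_eq_getElem_cons hl]
  have : b - a = (b - (a + 1)) + 1 := by omega
  rw [this, List.take_succ_cons]

theorem pvWin_snoc {l : List Char} {a b : Nat} (hab : a ≤ b) (hl : b < l.length) :
    pvWin l a (b + 1) = pvWin l a b ++ [l[b]] := by
  rw [pvWin, pvWin]
  have h1 : b + 1 - a = (b - a) + 1 := by omega
  rw [h1, List.take_add_one]
  have h2 : (l.drop a)[b - a]? = some l[b] := by
    rw [List.getElem?_drop]
    rw [List.getElem?_eq_getElem (by omega)]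
    congr 1
    congr 1
    omega
  simp [h2]

theorem pvOk_mono (l : List Char) (k : Int) {a a' b : Nat} (h : a ≤ a')
    (hok : pvOk l k a b = true) : pvOk l k a' b = true := by
  rw [pvOk, List.all_eq_true] at *
  intro c hc
  rw [pvWin_drop l b h] at hc ⊢
  simp only [decide_eq_true_eq] at *
  have hm : c ∈ pvWin l a b := (List.drop_sublist _ _).mem hc
  have hcnt : ((pvWin l a b).drop (a' - a)).count c ≤ (pvWin l a b).count c :=
    (List.drop_sublist _ _).count_le c
  have := hok c hm
  omega

theorem pvOk_shrink (l : List Char) (k : Int) {a b : Nat} (hl : b < l.length)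
    (hok : pvOk l k a (b + 1) = true) : pvOk l k a b = true := by
  by_cases hab : a ≤ b
  · rw [pvOk, List.all_eq_true] at *
    intro c hc
    have hsub : (pvWin l a b).Sublist (pvWin l a (b + 1)) := by
      rw [pvWin_snoc hab hl]; exact List.sublist_append_left _ _
    simp only [decide_eq_true_eq] at *
    have := hok c (hsub.mem hc)
    have := hsub.count_le c
    omega
  · exact pvOk_of_ge l k (by omega)

theorem pvOk_cons_iff (l : List Char) (k : Int) {a b : Nat} (hab : a < b) (hl : a < l.length) :
    pvOk l k a b = true ↔
      (pvOk l k (a + 1) b = true ∧ ((pvWin l a b).count l[a] : Int) ≤ k) := by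
  constructor
  · intro hok
    refine ⟨pvOk_mono l k (by omega) hok, ?_⟩
    rw [pvOk, List.all_eq_true] at hok
    have hm : l[a] ∈ pvWin l a b := by rw [pvWin_cons hab hl]; exact List.mem_cons_self
    simpa using hok _ hm
  · rintro ⟨hok, hcnt⟩
    rw [pvOk, List.all_eq_true]
    intro c hc
    simp only [decide_eq_true_eq]
    by_cases hce : c = l[a]
    · subst hce; exact hcnt
    · rw [pvOk, List.all_eq_true] at hok
      rw [pvWin_cons hab hl] at hc ⊢
      rcases List.mem_cons.mp hc with h | h
      · exact absurd h hce
      · have := hok c h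
        simp only [decide_eq_true_eq] at this
        rw [List.count_cons_of_ne (fun h => hce h.symm)]
        exact this

theorem pvMinL_eq (l : List Char) (k : Int) {r a : Nat}
    (h1 : pvOk l k a (r + 1) = true)
    (h2 : a = 0 ∨ pvOk l k (a - 1) (r + 1) = false) : pvMinL l k r = a := by
  rw [pvMinL, Nat.find_eq_iff]
  refine ⟨h1, ?_⟩
  intro b hb hbok
  rcases h2 with h | h
  · omega
  · have := pvOk_mono l k (show b ≤ a - 1 by omega) hbok
    rw [this] at h
    exact absurd h (by simp)

-- B's backward scan computes a left end that is valid and minimally so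
theorem pvBScan_spec (l : List Char) (k : Int) (r : Nat) (hr : r < l.length) :
    ∀ (m : Nat) (counts : PySem.Dict Char Int), m ≤ r + 1 →
      (∀ c, counts.getD c 0 = ((pvWin l m (r + 1)).count c : Int)) →
      pvOk l k m (r + 1) = true →
      ∃ a : Nat, pvBScan l k counts (m : Int) ((m : Int) - 1) = some (a : Int) ∧
        a ≤ m ∧ pvOk l k a (r + 1) = true ∧ (a = 0 ∨ pvOk l k (a - 1) (r + 1) = false) := by
  intro m
  induction m with
  | zero =>
    intro counts _ _ hok
    refine ⟨0, ?_, le_rfl, hok, Or.inl rfl⟩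
    rw [pvBScan]; norm_num
  | succ m ih =>
    intro counts hm hc hok
    have hml : m < l.length := by omega
    have e1 : ((m + 1 : Nat) : Int) - 1 = (m : Int) := by push_cast; ring
    rw [pvBScan, e1]
    rw [if_pos (by positivity)]
    have hget : PySem.List.pyGet? l ((m : Nat) : Int) = some l[m] := by
      rw [PySem.List.pyGet?_natCast, List.getElem?_eq_getElem hml]
    rw [hget]
    dsimp only
    have hwin : pvWin l m (r + 1) = l[m] :: pvWin l (m + 1) (r + 1) :=
      pvWin_cons (by omega) hml
    by_cases hbreak : counts.getD l[m] 0 + 1 > k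
    · rw [if_pos hbreak]
      refine ⟨m + 1, rfl, le_rfl, hok, Or.inr ?_⟩
      simp only [Nat.add_sub_cancel]
      by_contra hcon
      rw [Bool.not_eq_false] at hcon
      have := (pvOk_cons_iff l k (by omega) hml).mp hcon
      have hcnt := hc l[m]
      have h2 := this.2
      have hw : (pvWin l m (r + 1)).count l[m] = (pvWin l (m + 1) (r + 1)).count l[m] + 1 := by
        rw [hwin, List.count_cons_self]
      rw [hw] at h2
      push_cast at h2 hcnt
      omega
    · rw [if_neg hbreak]
      have hok' : pvOk l k m (r + 1) = true := by
        rw [pvOk_cons_iff l k (by omega) hml]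
        refine ⟨hok, ?_⟩
        have hcnt := hc l[m]
        rw [hwin, List.count_cons_self]
        push_cast
        push_cast at hcnt
        omega
      have hc' : ∀ c, (counts.insert l[m] (counts.getD l[m] 0 + 1)).getD c 0 =
          ((pvWin l m (r + 1)).count c : Int) := by
        intro c
        rw [PySem.Dict.getD_insert]
        by_cases hce : c = l[m]
        · subst hce
          rw [if_pos rfl, hc, hwin, List.count_cons_self]
          push_cast; omega
        · rw [if_neg hce, hc, hwin, List.count_cons_of_ne (fun h => hce h.symm)]
      obtain ⟨a, heq, hle, h1, h2⟩ := ih _ (by omega) hc' hok'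
      exact ⟨a, heq, by omega, h1, h2⟩

-- A's inner while loop advances left to the same valid-and-minimal left end
theorem pvAInner_spec (l : List Char) (k : Int) (r : Nat) (hr : r < l.length) (hk : 0 ≤ k) :
    ∀ (d : Nat) (m : Nat) (lc : PySem.Dict Char Int), m + d = r + 1 →
      (∀ c, lc.getD c 0 = ((pvWin l m (r + 1)).count c : Int)) →
      (∀ c, c ≠ l[r] → ((pvWin l m (r + 1)).count c : Int) ≤ k) →
      (m = 0 ∨ pvOk l k (m - 1) (r + 1) = false) →
      ∃ (a : Nat) (lc' : PySem.Dict Char Int),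
        pvAInner l k l[r] lc (m : Int) = some (lc', (a : Int)) ∧ m ≤ a ∧ a ≤ r + 1 ∧
        (∀ c, lc'.getD c 0 = ((pvWin l a (r + 1)).count c : Int)) ∧
        pvOk l k a (r + 1) = true ∧ (a = 0 ∨ pvOk l k (a - 1) (r + 1) = false) := by
  intro d
  induction d with
  | zero =>
    intro m lc hm hc hside hmin
    have hm' : m = r + 1 := by omega
    subst hm'
    rw [pvAInner]
    have h0 : lc.getD l[r] 0 = 0 := by
      rw [hc]; simp [pvWin]
    rw [if_neg (by rw [h0]; omega)]
    refine ⟨r + 1, lc, rfl, le_rfl, le_rfl, hc, ?_, hmin⟩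
    exact pvOk_of_ge l k le_rfl
  | succ d ih =>
    intro m lc hm hc hside hmin
    have hml : m < l.length := by omega
    have hwin : pvWin l m (r + 1) = l[m] :: pvWin l (m + 1) (r + 1) :=
      pvWin_cons (by omega) hml
    rw [pvAInner]
    by_cases hcond : lc.getD l[r] 0 > k
    · rw [if_pos hcond]
      have hget : PySem.List.pyGet? l (m : Int) = some l[m] := by
        rw [PySem.List.pyGet?_natCast, List.getElem?_eq_getElem hml]
      rw [hget]
      dsimp only
      have hc' : ∀ c, (lc.insert l[m] (lc.getD l[m] 0 - 1)).getD c 0 =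
          ((pvWin l (m + 1) (r + 1)).count c : Int) := by
        intro c
        rw [PySem.Dict.getD_insert]
        by_cases hce : c = l[m]
        · subst hce
          rw [if_pos rfl, hc, hwin, List.count_cons_self]
          push_cast; omega
        · rw [if_neg hce, hc, hwin, List.count_cons_of_ne (fun h => hce h.symm)]
      have hside' : ∀ c, c ≠ l[r] → ((pvWin l (m + 1) (r + 1)).count c : Int) ≤ k := by
        intro c hcr
        have := hside c hcr
        have hsub : (pvWin l (m + 1) (r + 1)).count c ≤ (pvWin l m (r + 1)).count c := by
          rw [hwin]; exact (List.sublist_cons_self _ _).count_le c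
        push_cast at this ⊢
        omega
      have hmin' : m + 1 = 0 ∨ pvOk l k (m + 1 - 1) (r + 1) = false := by
        right
        simp only [Nat.add_sub_cancel]
        by_contra hcon
        rw [Bool.not_eq_false] at hcon
        rw [pvOk, List.all_eq_true] at hcon
        have hmem : l[r] ∈ pvWin l m (r + 1) := by
          have : 0 < (pvWin l m (r + 1)).count l[r] := by
            have := hc l[r]; push_cast at this ⊢; omega
          exact List.count_pos_iff.mp this
        have := hcon l[r] hmem
        simp only [decide_eq_true_eq] at this
        have hcnt := hc l[r]
        omega
      obtain ⟨a, lc', heq, hma, har, h4, h5, h6⟩ := ih (m + 1) _ (by omega) hc' hside' hmin'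
      have harg : (m : Int) + 1 = ((m + 1 : Nat) : Int) := by push_cast; ring
      rw [harg, heq]
      exact ⟨a, lc', rfl, by omega, har, h4, h5, h6⟩
    · rw [if_neg hcond]
      refine ⟨m, lc, rfl, le_rfl, by omega, hc, ?_, hmin⟩
      rcases Nat.eq_or_lt_of_le (show m ≤ r + 1 by omega) with hmr | hmr
      · exact pvOk_of_ge l k (by omega)
      · rw [pvOk, List.all_eq_true]
        intro c hmem
        simp only [decide_eq_true_eq]
        by_cases hce : c = l[r]
        · subst hce
          have := hc l[r]
          omega
        · exact hside c hce

-- A's outer loop equals the reference fold over the remaining right ends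
theorem pvAOuter_spec (l : List Char) (N : Nat) (k : Int) (hN : N ≤ l.length) (hk : 0 ≤ k) :
    ∀ (d : Nat) (r m : Nat) (lc : PySem.Dict Char Int) (ms : Int × Int), r + d = N → m ≤ r →
      (∀ c, lc.getD c 0 = ((pvWin l m r).count c : Int)) →
      pvOk l k m r = true → (m = 0 ∨ pvOk l k (m - 1) r = false) →
      pvAOuter l (N : Int) k (m : Int) (r : Int) ms.1 ms.2 lc =
        some ((List.range' r d).foldl (pvRefStep l k) ms) := by
  intro d
  induction d with
  | zero =>
    intro r m lc ms hr hm hc hok hmin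
    rw [pvAOuter, if_neg (by push_cast; omega)]
    simp
  | succ d ih =>
    intro r m lc ms hr hm hc hok hmin
    have hrl : r < l.length := by omega
    rw [pvAOuter, if_pos (by constructor <;> (push_cast; omega))]
    have hget : PySem.List.pyGet? l (r : Int) = some l[r] := by
      rw [PySem.List.pyGet?_natCast, List.getElem?_eq_getElem hrl]
    rw [hget]
    dsimp only
    -- the two dict updates add one occurrence of l[r]
    set c0 := l[r] with hc0
    set lc0 := if lc.contains c0 then lc else lc.insert c0 0 with hlc0
    have hlc0D : ∀ c, lc0.getD c 0 = lc.getD c 0 := by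
      intro c
      rw [hlc0]
      by_cases hin : lc.contains c0 = true
      · rw [if_pos hin]
      · rw [if_neg hin, PySem.Dict.getD_insert]
        by_cases hce : c = c0
        · subst hce
          rw [if_pos rfl]
          exact (PySem.Dict.getD_of_not_contains lc 0 (by simpa using hin)).symm
        · rw [if_neg hce]
    have hwin : pvWin l m (r + 1) = pvWin l m r ++ [c0] := pvWin_snoc hm hrl
    have hc1 : ∀ c, (lc0.insert c0 (lc0.getD c0 0 + 1)).getD c 0 =
        ((pvWin l m (r + 1)).count c : Int) := by
      intro c
      rw [PySem.Dict.getD_insert]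
      by_cases hce : c = c0
      · subst hce
        rw [if_pos rfl, hlc0D, hc, hwin, List.count_append]
        have h1 : List.count c0 [c0] = 1 := by simp
        rw [h1]
        push_cast
        ring
      · have hce' : ¬ c0 = c := fun h => hce h.symm
        rw [if_neg hce, hlc0D, hc, hwin, List.count_append]
        simp [hce']
    have hside : ∀ c, c ≠ c0 → ((pvWin l m (r + 1)).count c : Int) ≤ k := by
      intro c hce
      have hce' : ¬ c0 = c := fun h => hce h.symm
      have hsing : List.count c [c0] = 0 := by simp [hce']
      rw [hwin, List.count_append, hsing]
      rw [pvOk, List.all_eq_true] at hok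
      by_cases hmem : c ∈ pvWin l m r
      · have := hok c hmem
        simp only [decide_eq_true_eq] at this
        simpa using this
      · rw [List.count_eq_zero_of_not_mem hmem]
        simpa using hk
    have hmin1 : m = 0 ∨ pvOk l k (m - 1) (r + 1) = false := by
      rcases hmin with h | h
      · exact Or.inl h
      · right
        by_contra hcon
        rw [Bool.not_eq_false] at hcon
        rw [pvOk_shrink l k hrl hcon] at h
        exact absurd h (by simp)
    obtain ⟨a, lc', heq, hma, har, h4, h5, h6⟩ :=
      pvAInner_spec l k r hrl hk (r + 1 - m) m _ (by omega) hc1 hside hmin1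
    rw [heq]
    dsimp only
    have hminL : pvMinL l k r = a := pvMinL_eq l k h5 h6
    have hnext : ∀ (ms' : Int × Int),
        pvAOuter l (N : Int) k (a : Int) ((r : Int) + 1) ms'.1 ms'.2 lc' =
          some ((List.range' (r + 1) d).foldl (pvRefStep l k) ms') := by
      intro ms'
      have hcast : ((r : Int) + 1) = ((r + 1 : Nat) : Int) := by push_cast; ring
      rw [hcast]
      apply ih (r + 1) a lc' ms' (by omega) har
      · intro c; exact h4 c
      · exact h5
      · exact h6
    have hrange : List.range' r (d + 1) = r :: List.range' (r + 1) d := List.range'_succ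
    rw [hrange, List.foldl_cons]
    rw [pvRefStep, hminL]
    by_cases hbr : (r : Int) - (a : Int) + 1 > ms.1
    · rw [if_pos hbr, if_pos hbr]
      exact hnext ((r : Int) - a + 1, (a : Int) + 1)
    · rw [if_neg hbr, if_neg hbr]
      exact hnext ms

-- B's fold equals the reference fold
theorem pvBFold_spec (l : List Char) (k : Int) :
    ∀ (rs : List Nat) (ms : Int × Int), (∀ r ∈ rs, r < l.length) →
      (rs.map (fun r : Nat => Int.ofNat r)).foldl
        (fun acc right =>
          match acc with
          | none => none
          | some ms =>
            match pvBScan l k PySem.Dict.empty (right + 1) right with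
            | none => none
            | some left =>
              if right - left + 1 > ms.1 then some (right - left + 1, left + 1) else some ms)
        (some ms) = some (rs.foldl (pvRefStep l k) ms) := by
  intro rs
  induction rs with
  | nil => intro ms _; simp
  | cons r rs ih =>
    intro ms hmem
    have hrl : r < l.length := hmem r List.mem_cons_self
    have hscan : pvBScan l k PySem.Dict.empty ((r : Int) + 1) (r : Int) =
        some ((pvMinL l k r : Nat) : Int) := by
      have hempty : ∀ c, (PySem.Dict.empty (κ := Char) (ν := Int)).getD c 0 =
          ((pvWin l (r + 1) (r + 1)).count c : Int) := by
        intro c; simp [pvWin]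
      obtain ⟨a, heq, _, h1, h2⟩ :=
        pvBScan_spec l k r hrl (r + 1) PySem.Dict.empty le_rfl hempty (pvOk_of_ge l k le_rfl)
      have e1 : ((r + 1 : Nat) : Int) = (r : Int) + 1 := by push_cast; ring
      rw [e1] at heq
      have e2 : (r : Int) + 1 - 1 = (r : Int) := by ring
      rw [e2] at heq
      rw [heq, pvMinL_eq l k h1 h2]
    rw [List.map_cons, List.foldl_cons, List.foldl_cons]
    dsimp only
    simp only [Int.ofNat_eq_natCast]
    rw [hscan]
    dsimp only
    have hstep : (if (r : Int) - ((pvMinL l k r : Nat) : Int) + 1 > ms.1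
        then some ((r : Int) - ((pvMinL l k r : Nat) : Int) + 1, ((pvMinL l k r : Nat) : Int) + 1)
        else some ms) = some (pvRefStep l k ms r) := by
      rw [pvRefStep]
      by_cases hbr : (r : Int) - ((pvMinL l k r : Nat) : Int) + 1 > ms.1
      · rw [if_pos hbr, if_pos hbr]
      · rw [if_neg hbr, if_neg hbr]
    rw [hstep]
    simpa only [Int.ofNat_eq_natCast] using ih _ (fun x hx => hmem x (List.mem_cons_of_mem r hx))

-- ===== VERDICT (by name: the statement is the Claim_ definition above) =====
theorem find_substring_with_k_elements_spec : Claim_equal_find_substring_with_k_elements := by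
  intro string n k _ hpre
  unfold Spec_find_substring_with_k_elements
  unfold find_substring_with_k_elements find_substring_with_k_elements_alt
  set l := string.toList with hl
  by_cases hn : n ≤ 0
  · rw [pvAOuter, if_neg (by omega)]
    have hrange : PySem.List.pyRange 0 n 1 = [] :=
      PySem.List.pyRange_one_eq_nil hn
    rw [hrange]
    simp
  · replace hn : 0 < n := by omega
    have hpre' : n ≤ (l.length : Int) ∧ 0 ≤ k := by
      rcases hpre with h | h
      · exact h
      · omega
    obtain ⟨hlen, hk⟩ := hpre'
    set N := n.toNat with hN
    have hnN : n = (N : Int) := by omega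
    have hNlen : N ≤ l.length := by omega
    have hA := pvAOuter_spec l N k hNlen hk N 0 0 PySem.Dict.empty (0, 0) (by omega) le_rfl
      (by intro c; simp [pvWin]) (pvOk_of_ge l k le_rfl) (Or.inl rfl)
    have hrange : PySem.List.pyRange 0 n 1 = (List.range N).map (fun r : Nat => Int.ofNat r) := by
      rw [PySem.List.pyRange_one]
      have e : (n - 0).toNat = N := by omega
      rw [e]
      simp [Int.ofNat_eq_natCast]
    have hB := pvBFold_spec l k (List.range N) (0, 0) (fun r hr => by
      have := List.mem_range.mp hr; omega)
    have hA2 : pvAOuter l (N : Int) k 0 0 0 0 PySem.Dict.empty =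
        some ((List.range N).foldl (pvRefStep l k) (0, 0)) := by
      rw [List.range_eq_range']
      simpa using hA
    rw [hrange, hB, hnN, hA2]
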